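-- pv_equiv track=rewrite | github.com/aurechabnv/advent-of-code | 2024/day_14/day_14.py | get_quadrants
-- ===== SOURCE A (Python) =====
-- def get_quadrants(grid, width, height):
--     mid_x = width // 2
--     mid_y = height // 2
--
--     q1 = q2 = q3 = q4 = 0
--     for (x, y), v in grid.items():
--         if x < mid_x and y < mid_y:
--             q1 += v
--         elif x > mid_x and y < mid_y:
--             q2 += v
--         elif x < mid_x and y > mid_y:
--             q3 += v
--         elif x > mid_x and y > mid_y:
--             q4 += v
--
--     return q1, q2, q3, q4
-- ===== SOURCE B (Python) =====
-- def get_quadrants(grid, width, height):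
--     mid_x = width // 2
--     mid_y = height // 2
--
--     # stage 1: partition cells into top/bottom halves by y (midline dropped)
--     top = []
--     bottom = []
--     for (x, y), v in grid.items():
--         if y < mid_y:
--             top.append((x, v))
--         elif y > mid_y:
--             bottom.append((x, v))
--
--     # stage 2: solve the 1-D subproblem on each half: split by x and sum
--     def halves(row):
--         left = right = 0
--         for x, v in row:
--             if x < mid_x:
--                 left += v
--             elif x > mid_x:
--                 right += v
--         return left, right
--
--     q1, q2 = halves(top)
--     q3, q4 = halves(bottom)
--     return q1, q2, q3, q4
-- ===== Notes on version B (the rewrite author's own statement) =====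
-- stated objective: alternative
-- what changed: Replaced A's fused single pass with a four-way if/elif chain by a two-stage divide-and-conquer: first partition cells into top/bottom halves by y into intermediate lists, then reduce each half with a 1-D left/right split by x.
import Mathlib
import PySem

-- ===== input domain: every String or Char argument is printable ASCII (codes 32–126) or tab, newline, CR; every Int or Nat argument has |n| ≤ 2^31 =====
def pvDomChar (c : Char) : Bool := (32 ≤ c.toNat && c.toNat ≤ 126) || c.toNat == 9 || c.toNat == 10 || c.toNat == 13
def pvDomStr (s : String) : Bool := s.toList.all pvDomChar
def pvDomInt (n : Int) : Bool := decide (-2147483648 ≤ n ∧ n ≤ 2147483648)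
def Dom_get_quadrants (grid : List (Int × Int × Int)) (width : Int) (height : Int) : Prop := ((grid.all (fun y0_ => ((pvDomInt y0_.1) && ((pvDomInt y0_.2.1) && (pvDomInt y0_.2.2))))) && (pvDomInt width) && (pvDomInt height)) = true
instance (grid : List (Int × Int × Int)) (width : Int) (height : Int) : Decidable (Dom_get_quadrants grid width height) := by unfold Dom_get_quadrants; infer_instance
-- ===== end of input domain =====

-- B changes the decomposition, not the result: a two-stage divide-and-conquer (partition by y, then split each half by x) replacing A's fused four-way branch; same O(n) cost.

-- ===== PORT A =====
-- A: one pass; an if/elif chain routes each cell's value into one of four accumulators.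
def stepA (mx my : Int) (q : Int × Int × Int × Int) (t : Int × Int × Int) : Int × Int × Int × Int :=
  if t.1 < mx ∧ t.2.1 < my then (q.1 + t.2.2, q.2.1, q.2.2.1, q.2.2.2)
  else if t.1 > mx ∧ t.2.1 < my then (q.1, q.2.1 + t.2.2, q.2.2.1, q.2.2.2)
  else if t.1 < mx ∧ t.2.1 > my then (q.1, q.2.1, q.2.2.1 + t.2.2, q.2.2.2)
  else if t.1 > mx ∧ t.2.1 > my then (q.1, q.2.1, q.2.2.1, q.2.2.2 + t.2.2)
  else q

def get_quadrants (grid : List (Int × Int × Int)) (width : Int) (height : Int) : Int × Int × Int × Int :=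
  let mid_x := PySem.Int.floordiv width 2
  let mid_y := PySem.Int.floordiv height 2
  grid.foldl (stepA mid_x mid_y) (0, 0, 0, 0)

-- ===== PORT B =====
-- B stage 1: partition the cells into top/bottom halves by y (midline dropped), appending as Python does.
def partStep (my : Int) (acc : List (Int × Int) × List (Int × Int)) (t : Int × Int × Int) :
    List (Int × Int) × List (Int × Int) :=
  if t.2.1 < my then (acc.1 ++ [(t.1, t.2.2)], acc.2)
  else if t.2.1 > my then (acc.1, acc.2 ++ [(t.1, t.2.2)])
  else acc

-- B stage 2: the 1-D subproblem on one half — split by x and sum left/right.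
def halvesStep (mx : Int) (acc : Int × Int) (t : Int × Int) : Int × Int :=
  if t.1 < mx then (acc.1 + t.2, acc.2)
  else if t.1 > mx then (acc.1, acc.2 + t.2)
  else acc

def get_quadrants_alt (grid : List (Int × Int × Int)) (width : Int) (height : Int) : Int × Int × Int × Int :=
  let mid_x := PySem.Int.floordiv width 2
  let mid_y := PySem.Int.floordiv height 2
  let tb := grid.foldl (partStep mid_y) ([], [])
  let q12 := tb.1.foldl (halvesStep mid_x) (0, 0)
  let q34 := tb.2.foldl (halvesStep mid_x) (0, 0)
  (q12.1, q12.2, q34.1, q34.2)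

-- ===== PRECONDITION & SPEC =====
def Spec_get_quadrants (grid : List (Int × Int × Int)) (width : Int) (height : Int) (out : Int × Int × Int × Int) : Prop := out = get_quadrants_alt grid width height
instance (grid : List (Int × Int × Int)) (width : Int) (height : Int) (out : Int × Int × Int × Int) : Decidable (Spec_get_quadrants grid width height out) := by unfold Spec_get_quadrants; infer_instance

-- ===== CLAIM (what is proved, stated in full; the proofs are below) =====
def Claim_equal_get_quadrants : Prop := ∀ (grid : List (Int × Int × Int)) (width : Int) (height : Int), Dom_get_quadrants grid width height → Spec_get_quadrants grid width height (get_quadrants grid width height)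

-- ===== LEMMAS AND PROOFS =====
-- the top/bottom lists stage 1 produces
def topOf (my : Int) (grid : List (Int × Int × Int)) : List (Int × Int) :=
  (grid.filter (fun t => t.2.1 < my)).map (fun t => (t.1, t.2.2))
def botOf (my : Int) (grid : List (Int × Int × Int)) : List (Int × Int) :=
  (grid.filter (fun t => t.2.1 > my)).map (fun t => (t.1, t.2.2))

theorem part_spec (my : Int) (grid : List (Int × Int × Int)) (acc : List (Int × Int) × List (Int × Int)) :
    grid.foldl (partStep my) acc = (acc.1 ++ topOf my grid, acc.2 ++ botOf my grid) := by
  induction grid generalizing acc with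
  | nil => simp [topOf, botOf]
  | cons t ts ih =>
    rw [List.foldl_cons, ih]
    simp only [partStep, topOf, botOf, List.filter_cons]
    split_ifs <;> simp_all <;> omega

theorem halves_shift (mx : Int) (row : List (Int × Int)) (acc : Int × Int) :
    row.foldl (halvesStep mx) acc
      = (acc.1 + (row.foldl (halvesStep mx) (0, 0)).1,
         acc.2 + (row.foldl (halvesStep mx) (0, 0)).2) := by
  induction row generalizing acc with
  | nil => simp
  | cons t ts ih =>
    rw [List.foldl_cons, List.foldl_cons, ih (halvesStep mx acc t),
      ih (halvesStep mx (0, 0) t)]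
    simp only [halvesStep]
    split_ifs <;> simp <;> omega

theorem hv_cons (mx : Int) (p : Int × Int) (row : List (Int × Int)) :
    ((p :: row).foldl (halvesStep mx) (0, 0))
      = ((halvesStep mx (0, 0) p).1 + (row.foldl (halvesStep mx) (0, 0)).1,
         (halvesStep mx (0, 0) p).2 + (row.foldl (halvesStep mx) (0, 0)).2) := by
  rw [List.foldl_cons, halves_shift]

theorem stepA_shift (mx my : Int) (grid : List (Int × Int × Int)) (q : Int × Int × Int × Int) :
    grid.foldl (stepA mx my) q
      = (q.1 + (grid.foldl (stepA mx my) (0, 0, 0, 0)).1,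
         q.2.1 + (grid.foldl (stepA mx my) (0, 0, 0, 0)).2.1,
         q.2.2.1 + (grid.foldl (stepA mx my) (0, 0, 0, 0)).2.2.1,
         q.2.2.2 + (grid.foldl (stepA mx my) (0, 0, 0, 0)).2.2.2) := by
  induction grid generalizing q with
  | nil => simp
  | cons t ts ih =>
    rw [List.foldl_cons, List.foldl_cons, ih (stepA mx my q t),
      ih (stepA mx my (0, 0, 0, 0) t)]
    simp only [stepA]
    split_ifs <;> simp <;> omega

theorem main_eq (mx my : Int) (grid : List (Int × Int × Int)) :
    grid.foldl (stepA mx my) (0, 0, 0, 0)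
      = (((topOf my grid).foldl (halvesStep mx) (0, 0)).1,
         ((topOf my grid).foldl (halvesStep mx) (0, 0)).2,
         ((botOf my grid).foldl (halvesStep mx) (0, 0)).1,
         ((botOf my grid).foldl (halvesStep mx) (0, 0)).2) := by
  induction grid with
  | nil => simp [topOf, botOf]
  | cons t ts ih =>
    rw [List.foldl_cons, stepA_shift, ih]
    simp only [topOf, botOf, List.filter_cons]
    split_ifs with h1 h2 <;>
      simp only [List.map_cons, hv_cons, stepA, halvesStep] <;>
      split_ifs <;> simp_all <;> omega

-- ===== VERDICT (by name: the statement is the Claim_ definition above) =====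
theorem get_quadrants_spec : Claim_equal_get_quadrants := by
  intro grid width height _
  unfold Spec_get_quadrants
  simp only [get_quadrants, get_quadrants_alt, part_spec, List.nil_append, main_eq]
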